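-- pv_equiv track=rewrite | github.com/enespekdas/THY-OTOMASYON | logic/validators.py | separate_managed_system_types
-- ===== SOURCE A (Python) =====
-- def separate_managed_system_types(app_list: list) -> tuple:
--     """
--     application listesinden managed system tiplerini (sadece 'RDP' veya 'SSH')
--     ve managed account'a bağlanacak diğer uygulamaları ayırır.
--     Sistem tipi olarak en fazla 1 tip döner (ilk bulunan).
--     """
--     valid_system_types = {"RDP", "SSH"}
--     system_type = None
--     account_apps = []
--
--     for app in app_list:
--         if app in valid_system_types and system_type is None:
--             system_type = app  # İlk RDP veya SSH tipi alınır
--         else: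
--             account_apps.append(app)
--
--     # system_type None ise boş liste, değilse liste olarak dönelim
--     return ([system_type] if system_type else []), account_apps
-- ===== SOURCE B (Python) =====
-- def separate_managed_system_types(app_list: list) -> tuple:
--     idx = next((i for i, app in enumerate(app_list) if app in {"RDP", "SSH"}), None)
--     if idx is None:
--         return ([], list(app_list))
--     return ([app_list[idx]], app_list[:idx] + app_list[idx + 1:])
-- ===== Notes on version B (the rewrite author's own statement) =====
-- stated objective: alternative
-- what changed: B locates the index of the first RDP/SSH element and builds the remainder by slicing around it, instead of A's single streaming loop with a one-shot flag and an accumulator.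
import Mathlib
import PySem

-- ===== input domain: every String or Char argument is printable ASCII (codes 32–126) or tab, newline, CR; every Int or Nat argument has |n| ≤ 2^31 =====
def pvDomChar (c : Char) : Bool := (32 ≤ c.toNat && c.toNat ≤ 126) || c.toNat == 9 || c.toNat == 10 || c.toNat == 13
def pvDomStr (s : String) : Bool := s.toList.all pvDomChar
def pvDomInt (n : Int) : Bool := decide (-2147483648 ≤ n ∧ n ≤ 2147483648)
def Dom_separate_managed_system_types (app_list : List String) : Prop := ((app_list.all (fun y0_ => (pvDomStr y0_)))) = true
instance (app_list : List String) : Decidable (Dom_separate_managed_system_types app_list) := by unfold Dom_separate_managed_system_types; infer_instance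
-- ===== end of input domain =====

-- B finds the first RDP/SSH index then slices around it, instead of A's streaming loop with a one-shot flag; same return value everywhere.
-- ===== PORT A =====
def sepLoop : List String → Option String → List String → Option String × List String
  | [], st, acc => (st, acc)
  | a :: rest, st, acc =>
    if (a == "RDP" || a == "SSH") && st.isNone then
      sepLoop rest (some a) acc
    else
      sepLoop rest st (acc ++ [a])

def separate_managed_system_types (app_list : List String) : List String × List String :=
  match sepLoop app_list none [] with
  | (st, acc) => ((match st with | some s => [s] | none => []), acc)

-- ===== PORT B =====
def separate_managed_system_types_alt (app_list : List String) : List String × List String :=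
  match app_list.findIdx? (fun a => a == "RDP" || a == "SSH") with
  | none => ([], app_list)
  | some i => ([app_list.getD i ""], app_list.take i ++ app_list.drop (i + 1))

-- ===== PRECONDITION & SPEC =====
def Spec_separate_managed_system_types (app_list : List String) (out : List String × List String) : Prop := out = separate_managed_system_types_alt app_list
instance (app_list : List String) (out : List String × List String) : Decidable (Spec_separate_managed_system_types app_list out) := by unfold Spec_separate_managed_system_types; infer_instance

-- ===== CLAIM (what is proved, stated in full; the proofs are below) =====
def Claim_equal_separate_managed_system_types : Prop := ∀ (app_list : List String), Dom_separate_managed_system_types app_list → Spec_separate_managed_system_types app_list (separate_managed_system_types app_list)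

-- ===== LEMMAS AND PROOFS =====

-- ===== VERDICT (by name: the statement is the Claim_ definition above) =====
lemma sepLoop_some (l : List String) (s : String) (acc : List String) :
    sepLoop l (some s) acc = (some s, acc ++ l) := by
  induction l generalizing acc with
  | nil => simp [sepLoop]
  | cons a rest ih => simp [sepLoop, ih]

lemma sepLoop_none (l : List String) (acc : List String) :
    sepLoop l none acc =
      match l.findIdx? (fun a => a == "RDP" || a == "SSH") with
      | none => (none, acc ++ l)
      | some i => (some (l.getD i ""), acc ++ (l.take i ++ l.drop (i + 1))) := by
  induction l generalizing acc with
  | nil => simp [sepLoop]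
  | cons a rest ih =>
    by_cases h : (a == "RDP" || a == "SSH") = true
    · simp [sepLoop, h, sepLoop_some, List.findIdx?_cons]
    · simp only [sepLoop, h, Bool.false_and, ih, List.findIdx?_cons, Option.map]
      cases hf : rest.findIdx? (fun a => a == "RDP" || a == "SSH") with
      | none => simp
      | some i => simp [List.getD]

theorem separate_managed_system_types_spec : Claim_equal_separate_managed_system_types := by
  intro app_list _
  unfold Spec_separate_managed_system_types separate_managed_system_types separate_managed_system_types_alt
  rw [sepLoop_none]
  cases hf : app_list.findIdx? (fun a => a == "RDP" || a == "SSH") <;> simp
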